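-- pv_equiv track=rewrite | github.com/lfdyf20/Leetcode | Maximum Size Subarray Sum Equals k.py | maxLengthElement
-- ===== SOURCE A (Python) =====
-- def maxLengthElement(nums, k):
--     dic = {}
--     for num in nums:
--     	newDic = {}
--     	if num not in dic:
--     		newDic[num] = 1
--     	for ele in dic:
--     		if ele+num in dic:
--     			newDic[ ele+num ] = max( dic[ele+num], dic[ele]+1 )
--     		else:
--     			newDic[ ele+num ] = dic[ ele ] + 1
--     	dic.update( newDic )
--     return dic[ k ]
-- ===== SOURCE B (Python) =====
-- def maxLengthElement(nums, k):
--     # Exhaustive subset enumeration: grow the list of (sum, size) pairs of all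
--     # subsets, then take the max size among nonempty subsets summing to k.
--     pairs = [(0, 0)]
--     for num in nums:
--         pairs = pairs + [(s + num, c + 1) for (s, c) in pairs]
--     return max(c for (s, c) in pairs if s == k and c > 0)
-- ===== Notes on version B (the rewrite author's own statement) =====
-- stated objective: alternative
-- what changed: A's incremental sum->max-size dictionary DP (a new dict merged into the running dict per element) is replaced by a plain exhaustive enumeration: grow the list of (sum, size) pairs of all subsets by doubling, then take one max over the sizes of nonempty subsets summing to k.
import Mathlib
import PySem

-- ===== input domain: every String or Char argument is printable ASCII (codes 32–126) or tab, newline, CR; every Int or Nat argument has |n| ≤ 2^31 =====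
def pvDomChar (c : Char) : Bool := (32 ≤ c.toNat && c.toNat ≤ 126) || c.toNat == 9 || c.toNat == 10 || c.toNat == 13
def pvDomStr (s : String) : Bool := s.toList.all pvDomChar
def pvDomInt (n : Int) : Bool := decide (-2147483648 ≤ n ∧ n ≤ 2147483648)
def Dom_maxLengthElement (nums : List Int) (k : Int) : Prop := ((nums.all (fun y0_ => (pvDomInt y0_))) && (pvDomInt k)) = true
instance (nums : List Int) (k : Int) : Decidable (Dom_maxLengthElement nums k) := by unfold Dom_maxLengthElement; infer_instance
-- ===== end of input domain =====

-- B replaces A's incremental sum→max-size dictionary DP by a plain exhaustive enumeration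
-- of all subsets (a growing list of (sum, size) pairs) followed by one max;
-- objective: alternative (structurally different, no speed claim).

-- ===== PORT A =====
-- one iteration of A's outer loop: build newDic from dic and num, then dic.update(newDic)
def pvStepA (dic : PySem.Dict Int Int) (num : Int) : PySem.Dict Int Int :=
  let newDic0 : PySem.Dict Int Int :=
    if dic.contains num then PySem.Dict.empty else PySem.Dict.empty.insert num 1
  let newDic := dic.keys.foldl (fun nd ele =>
      if dic.contains (ele + num) then
        nd.insert (ele + num) (max (dic.getD (ele + num) 0) (dic.getD ele 0 + 1))
      else
        nd.insert (ele + num) (dic.getD ele 0 + 1)) newDic0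
  dic.update newDic.items

def maxLengthElement (nums : List Int) (k : Int) : Int :=
  let dic := nums.foldl pvStepA PySem.Dict.empty
  ((dic.get? k).getD 0)   -- none = Python's KeyError on dic[k]; excluded by Pre_

-- ===== PORT B =====
-- one iteration of B's loop: pairs = pairs + [(s + num, c + 1) for (s, c) in pairs]
def pvStepB (ps : List (Int × Int)) (num : Int) : List (Int × Int) :=
  ps ++ ps.map (fun p => (p.1 + num, p.2 + 1))

def maxLengthElement_alt (nums : List Int) (k : Int) : Int :=
  let pairs := nums.foldl pvStepB [((0 : Int), (0 : Int))]
  ((PySem.List.max? (pairs.filterMap (fun p => if p.1 = k ∧ 0 < p.2 then some p.2 else none))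
      (fun c => c)).getD 0)   -- none = Python's ValueError on max(empty); excluded by Pre_

-- ===== PRECONDITION & SPEC =====
-- Pre_ excludes exactly the inputs where no nonempty subset of nums sums to k:
-- there A raises KeyError (and B raises ValueError).
def Pre_maxLengthElement (nums : List Int) (k : Int) : Prop :=
  ∃ l ∈ nums.sublists, l ≠ [] ∧ l.sum = k
instance (nums : List Int) (k : Int) : Decidable (Pre_maxLengthElement nums k) := by
  unfold Pre_maxLengthElement; infer_instance

def pvWitness_maxLengthElement : List Int × Int := ([1, 2], 3)

def Spec_maxLengthElement (nums : List Int) (k : Int) (out : Int) : Prop := out = maxLengthElement_alt nums k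
instance (nums : List Int) (k : Int) (out : Int) : Decidable (Spec_maxLengthElement nums k out) := by unfold Spec_maxLengthElement; infer_instance

-- ===== CLAIM (what is proved, stated in full; the proofs are below) =====
def Claim_equal_maxLengthElement : Prop := ∀ (nums : List Int) (k : Int), Dom_maxLengthElement nums k → Pre_maxLengthElement nums k → Spec_maxLengthElement nums k (maxLengthElement nums k)

-- ===== LEMMAS AND PROOFS =====

-- sizes of the subsets recorded in P whose sum is s
def pvCands (P : List (Int × Int)) (s : Int) : List Int :=
  P.filterMap (fun p => if p.1 = s then some p.2 else none)

-- max subset size for sum s (0 if none)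
def pvF (P : List (Int × Int)) (s : Int) : Int := (pvCands P s).foldl max 0

-- structural facts about B's pair list
def pvGood (P : List (Int × Int)) : Prop :=
  (∀ p ∈ P, 0 ≤ p.2 ∧ (p.2 = 0 → p.1 = 0)) ∧ ((0 : Int), (0 : Int)) ∈ P

-- the invariant tying A's dictionary to B's pair list
def pvRel (dic : PySem.Dict Int Int) (P : List (Int × Int)) : Prop :=
  dic.keys.Nodup ∧ ∀ s : Int, dic.get? s = if 0 < pvF P s then some (pvF P s) else none

-- ---- folded-max toolbox ----

theorem pv_foldl_max_init (l : List Int) (a b : Int) :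
    l.foldl max (max a b) = max a (l.foldl max b) := by
  induction l generalizing b with
  | nil => rfl
  | cons c t ih => simpa [max_assoc] using ih (max b c)

theorem pv_init_le_foldl_max (l : List Int) (a : Int) : a ≤ l.foldl max a := by
  induction l generalizing a with
  | nil => exact le_rfl
  | cons c t ih => exact le_trans (le_max_left a c) (ih (max a c))

theorem pv_mem_le_foldl_max (l : List Int) (a c : Int) (h : c ∈ l) : c ≤ l.foldl max a := by
  induction l generalizing a with
  | nil => cases h
  | cons d t ih =>
    rcases List.mem_cons.mp h with rfl | h'
    · exact le_trans (le_max_right a c) (pv_init_le_foldl_max t _)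
    · exact ih _ h'

theorem pv_foldl_max_base_eq (l : List Int) (a b : Int) (hl : l ≠ [])
    (hb : ∀ y ∈ l, b ≤ y) (hab : a ≤ b) : l.foldl max a = l.foldl max b := by
  cases l with
  | nil => cases hl rfl
  | cons y t =>
    have hy : b ≤ y := hb y List.mem_cons_self
    have h1 : max a y = y := max_eq_right (le_trans hab hy)
    have h2 : max b y = y := max_eq_right hy
    simp [List.foldl_cons, h1, h2]

theorem pv_foldl_max_map_add_one (l : List Int) (a : Int) :
    (l.map (fun c => c + 1)).foldl max (a + 1) = l.foldl max a + 1 := by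
  induction l generalizing a with
  | nil => rfl
  | cons c t ih =>
    have h : max (a + 1) (c + 1) = max a c + 1 := by omega
    simp only [List.map_cons, List.foldl_cons, h, ih (max a c)]

theorem pv_foldl_max_filter_pos (l : List Int) (a : Int) (ha : 0 ≤ a)
    (hl : ∀ c ∈ l, 0 ≤ c) :
    (l.filter (fun c => decide (0 < c))).foldl max a = l.foldl max a := by
  induction l generalizing a with
  | nil => rfl
  | cons c t ih =>
    have hc : 0 ≤ c := hl c List.mem_cons_self
    have ht : ∀ d ∈ t, 0 ≤ d := fun d hd => hl d (List.mem_cons_of_mem _ hd)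
    by_cases hpos : 0 < c
    · simp only [List.filter_cons, decide_eq_true hpos, List.foldl_cons]
      exact ih (max a c) (le_max_of_le_left ha) ht
    · have hc0 : c = 0 := by omega
      subst hc0
      simp only [List.filter_cons, List.foldl_cons]
      rw [if_neg (by simp), max_eq_left ha]
      exact ih a ha ht

-- ---- pvCands / pvF facts ----

theorem pv_mem_cands (P : List (Int × Int)) (s c : Int) :
    c ∈ pvCands P s ↔ (s, c) ∈ P := by
  unfold pvCands
  rw [List.mem_filterMap]
  constructor
  · rintro ⟨p, hp, hpc⟩
    by_cases h : p.1 = s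
    · simp only [if_pos h] at hpc
      obtain ⟨p1, p2⟩ := p
      simp only at h hpc
      subst h
      cases hpc
      exact hp
    · simp [if_neg h] at hpc
  · intro h
    exact ⟨(s, c), h, by simp⟩

theorem pv_F_nonneg (P : List (Int × Int)) (s : Int) : 0 ≤ pvF P s :=
  pv_init_le_foldl_max _ _

theorem pv_le_F (P : List (Int × Int)) (s c : Int) (h : c ∈ pvCands P s) : c ≤ pvF P s :=
  pv_mem_le_foldl_max _ _ _ h

theorem pv_cands_nil_of_F_eq_zero (P : List (Int × Int)) (s : Int) (hG : pvGood P)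
    (hF : pvF P s = 0) (hs : ¬ s = 0) : pvCands P s = [] := by
  cases hcs : pvCands P s with
  | nil => rfl
  | cons c t =>
    exfalso
    have hc : c ∈ pvCands P s := by rw [hcs]; exact List.mem_cons_self
    have hmem : (s, c) ∈ P := (pv_mem_cands P s c).mp hc
    have h0 := hG.1 (s, c) hmem
    have hcpos : 0 < c := by
      rcases lt_or_eq_of_le h0.1 with h | h
      · exact h
      · exact absurd (h0.2 h.symm) hs
    have := pv_le_F P s c hc
    omega

theorem pv_cands_ne_nil_of_F_pos (P : List (Int × Int)) (s : Int) (hF : 0 < pvF P s) :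
    pvCands P s ≠ [] := by
  intro h
  rw [pvF, h] at hF
  simp at hF

theorem pv_zero_mem_cands_zero (P : List (Int × Int)) (hG : pvGood P) :
    (0 : Int) ∈ pvCands P 0 := (pv_mem_cands P 0 0).mpr hG.2

theorem pv_cands_append (P Q : List (Int × Int)) (s : Int) :
    pvCands (P ++ Q) s = pvCands P s ++ pvCands Q s := by
  simp [pvCands]

theorem pv_cands_shift (P : List (Int × Int)) (x s : Int) :
    pvCands (P.map (fun p => (p.1 + x, p.2 + 1))) s = (pvCands P (s - x)).map (fun c => c + 1) := by
  unfold pvCands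
  rw [List.filterMap_map, List.map_filterMap]
  congr 1
  funext p
  by_cases h : p.1 + x = s
  · simp [Function.comp, show p.1 = s - x by omega]
  · simp [Function.comp, h, show ¬ p.1 = s - x by omega]

theorem pv_good_stepB (P : List (Int × Int)) (x : Int) (hG : pvGood P) :
    pvGood (pvStepB P x) := by
  constructor
  · intro p hp
    rcases List.mem_append.mp hp with h | h
    · exact hG.1 p h
    · rcases List.mem_map.mp h with ⟨q, hq, rfl⟩
      have := hG.1 q hq
      exact ⟨by omega, by intro h0; omega⟩
  · exact List.mem_append.mpr (Or.inl hG.2)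

theorem pv_F_stepB (P : List (Int × Int)) (x s : Int) (hG : pvGood P) :
    pvF (pvStepB P x) s =
      if pvCands P (s - x) = [] then pvF P s else max (pvF P s) (pvF P (s - x) + 1) := by
  have hc : pvCands (pvStepB P x) s = pvCands P s ++ (pvCands P (s - x)).map (fun c => c + 1) := by
    rw [pvStepB, pv_cands_append, pv_cands_shift]
  rw [pvF, hc, List.foldl_append]
  cases hc2 : pvCands P (s - x) with
  | nil => simp [pvF]
  | cons c0 t0 =>
    rw [if_neg (by simp)]
    have hFs : max (pvF P s) 0 = pvF P s := max_eq_left (pv_F_nonneg P s)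
    have hall : ∀ y ∈ (c0 :: t0).map (fun c => c + 1), (1 : Int) ≤ y := by
      intro y hy
      rcases List.mem_map.mp hy with ⟨c, hc', rfl⟩
      have hmem : (s - x, c) ∈ P := (pv_mem_cands P (s - x) c).mp (hc2 ▸ hc')
      have := (hG.1 _ hmem).1
      omega
    calc ((c0 :: t0).map (fun c => c + 1)).foldl max (pvF P s)
        = ((c0 :: t0).map (fun c => c + 1)).foldl max (max (pvF P s) 0) := by rw [hFs]
      _ = max (pvF P s) (((c0 :: t0).map (fun c => c + 1)).foldl max 0) := pv_foldl_max_init _ _ _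
      _ = max (pvF P s) (((c0 :: t0).map (fun c => c + 1)).foldl max 1) := by
            rw [pv_foldl_max_base_eq _ 0 1 (by simp) hall (by norm_num)]
      _ = max (pvF P s) (pvF P (s - x) + 1) := by
            have h := pv_foldl_max_map_add_one (c0 :: t0) 0
            rw [show ((0:Int) + 1) = 1 by norm_num] at h
            rw [h]
            simp only [pvF, hc2]

-- ---- Dict toolbox ----

theorem pv_get?_foldl_insert_pairs (l : List (Int × Int)) (d : PySem.Dict Int Int) (s : Int)
    (hnd : (l.map Prod.fst).Nodup) :
    (l.foldl (fun d p => d.insert p.1 p.2) d).get? s =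
      match l.find? (fun p => p.1 == s) with
      | some p => some p.2
      | none => d.get? s := by
  induction l generalizing d with
  | nil => rfl
  | cons p t ih =>
    have hndt : (t.map Prod.fst).Nodup := (List.nodup_cons.mp (by simpa using hnd)).2
    by_cases hp : p.1 = s
    · have hfind : (p :: t).find? (fun p => p.1 == s) = some p := by
        simp [List.find?_cons, hp]
      rw [hfind, List.foldl_cons, ih _ hndt]
      have hnone : t.find? (fun q => q.1 == s) = none := by
        rw [List.find?_eq_none]
        intro q hq
        have hmem : q.1 ∈ t.map Prod.fst := List.mem_map.mpr ⟨q, hq, rfl⟩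
        have hne : q.1 ≠ p.1 := by
          intro h
          exact (List.nodup_cons.mp (by simpa using hnd)).1 (h ▸ hmem)
        simpa using (hp ▸ hne)
      rw [hnone]
      subst hp
      exact PySem.Dict.get?_insert_self d p.1 p.2
    · have hfind : (p :: t).find? (fun p => p.1 == s) = t.find? (fun p => p.1 == s) := by
        simp [List.find?_cons, hp]
      rw [hfind, List.foldl_cons, ih _ hndt]
      cases t.find? (fun p => p.1 == s) with
      | some q => rfl
      | none => exact PySem.Dict.get?_insert_of_ne d p.2 (fun h => hp h.symm)

theorem pv_find?_keys (keys : List Int) (x s : Int) :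
    keys.find? (fun ele => ele + x == s) =
      if (s - x) ∈ keys then some (s - x) else none := by
  induction keys with
  | nil => rfl
  | cons e t ih =>
    by_cases he : e + x = s
    · have h1 : e = s - x := by omega
      subst h1
      simp [he]
    · have h2 : ¬ s - x = e := by omega
      rw [List.find?_cons_of_neg (by simpa using he), ih]
      simp only [List.mem_cons]
      by_cases hm : s - x ∈ t
      · rw [if_pos hm, if_pos (Or.inr hm)]
      · rw [if_neg hm, if_neg (by rintro (h | h); exact h2 h; exact hm h)]

-- A's one outer iteration, as a pointwise lookup characterization
theorem pv_stepA_get? (dic : PySem.Dict Int Int) (x s : Int) (hnd : dic.keys.Nodup) :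
    (pvStepA dic x).get? s =
      if dic.contains (s - x) then
        some (if dic.contains s then max (dic.getD s 0) (dic.getD (s - x) 0 + 1)
              else dic.getD (s - x) 0 + 1)
      else if s = x ∧ dic.contains x = false then some 1
      else dic.get? s := by
  have hbody : (fun (nd : PySem.Dict Int Int) (ele : Int) =>
      if dic.contains (ele + x) then
        nd.insert (ele + x) (max (dic.getD (ele + x) 0) (dic.getD ele 0 + 1))
      else nd.insert (ele + x) (dic.getD ele 0 + 1)) =
      fun nd ele => nd.insert (ele + x)
        (if dic.contains (ele + x) then max (dic.getD (ele + x) 0) (dic.getD ele 0 + 1)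
         else dic.getD ele 0 + 1) := by
    funext nd ele
    by_cases h : dic.contains (ele + x) <;> simp [h]
  set val : Int → Int := fun ele =>
    if dic.contains (ele + x) then max (dic.getD (ele + x) 0) (dic.getD ele 0 + 1)
    else dic.getD ele 0 + 1 with hval
  set nd0 : PySem.Dict Int Int :=
    if dic.contains x then PySem.Dict.empty else PySem.Dict.empty.insert x 1 with hnd0
  set d2 := dic.keys.foldl (fun nd ele => nd.insert (ele + x) (val ele)) nd0 with hd2
  have hA : pvStepA dic x = dic.update d2.items := by
    rw [pvStepA, hd2, hbody]
  rw [hA]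
  have hnd0keys : nd0.keys.Nodup := by
    rw [hnd0]
    by_cases h : dic.contains x
    · simp only [if_pos h]; exact PySem.Dict.nodup_keys_empty
    · simp only [if_neg h]
      exact PySem.Dict.nodup_keys_insert _ _ _ PySem.Dict.nodup_keys_empty
  have hnd2keys : d2.keys.Nodup := by
    rw [hd2]
    exact PySem.Dict.nodup_keys_foldl_insert_key dic.keys (fun ele => ele + x)
      (fun nd ele => val ele) nd0 hnd0keys
  have hmap : d2 = (dic.keys.map (fun ele => (ele + x, val ele))).foldl
      (fun d p => d.insert p.1 p.2) nd0 := by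
    rw [hd2, List.foldl_map]
  have hndmap : ((dic.keys.map (fun ele => (ele + x, val ele))).map Prod.fst).Nodup := by
    rw [List.map_map]
    exact hnd.map (fun a b h => by simpa using h)
  have hfind : (dic.keys.map (fun ele => (ele + x, val ele))).find? (fun p => p.1 == s) =
      (dic.keys.find? (fun ele => ele + x == s)).map (fun ele => (ele + x, val ele)) := by
    rw [List.find?_map]; rfl
  have hd2get : d2.get? s =
      if (s - x) ∈ dic.keys then some (val (s - x)) else nd0.get? s := by
    rw [hmap, pv_get?_foldl_insert_pairs _ _ _ hndmap, hfind, pv_find?_keys]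
    by_cases h : (s - x) ∈ dic.keys
    · simp [h]
    · simp [h]
  have hupd : (dic.update d2.items).get? s =
      match d2.items.find? (fun p => p.1 == s) with
      | some p => some p.2
      | none => dic.get? s := by
    rw [PySem.Dict.update]
    exact pv_get?_foldl_insert_pairs d2.items dic s hnd2keys
  have hgetdef : d2.get? s = (d2.items.find? (fun p => p.1 == s)).map Prod.snd := rfl
  have hupd' : (dic.update d2.items).get? s = (d2.get? s).or (dic.get? s) := by
    rw [hupd, hgetdef]
    cases d2.items.find? (fun p => p.1 == s) <;> rfl
  rw [hupd', hd2get]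
  by_cases hmem : (s - x) ∈ dic.keys
  · have hcont : dic.contains (s - x) = true := (PySem.Dict.contains_iff_mem_keys _ _).mpr hmem
    rw [if_pos hmem, Option.some_or, if_pos hcont]
    simp only [hval, show s - x + x = s by omega]
  · have hcont : dic.contains (s - x) = false := by
      cases h : dic.contains (s - x)
      · rfl
      · exact absurd ((PySem.Dict.contains_iff_mem_keys _ _).mp h) hmem
    rw [if_neg hmem, hcont, if_neg (by simp), hnd0]
    by_cases hcx : dic.contains x
    · rw [if_pos hcx, PySem.Dict.get?_empty, Option.none_or,
          if_neg (fun h => by rw [h.2] at hcx; cases hcx)]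
    · have hcxf : dic.contains x = false := by
        cases h : dic.contains x
        · rfl
        · exact absurd h hcx
      rw [if_neg hcx]
      by_cases hsx : s = x
      · subst hsx
        rw [PySem.Dict.get?_insert_self, Option.some_or, if_pos ⟨rfl, hcxf⟩]
      · rw [PySem.Dict.get?_insert_of_ne _ _ hsx, PySem.Dict.get?_empty, Option.none_or,
            if_neg (fun h => hsx h.1)]

-- invariant preservation through one outer iteration
theorem pv_step_rel (P : List (Int × Int)) (dic : PySem.Dict Int Int) (x : Int)
    (hG : pvGood P) (hR : pvRel dic P) : pvRel (pvStepA dic x) (pvStepB P x) := by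
  obtain ⟨hnd, hget⟩ := hR
  have hcont : ∀ t : Int, dic.contains t = decide (0 < pvF P t) := by
    intro t
    rw [PySem.Dict.contains_eq_isSome_get?, hget t]
    by_cases h : 0 < pvF P t <;> simp [h]
  have hgetD : ∀ t : Int, 0 < pvF P t → dic.getD t 0 = pvF P t := by
    intro t ht
    rw [PySem.Dict.getD_eq_get?_getD, hget t, if_pos ht]
    rfl
  constructor
  · unfold pvStepA
    exact PySem.Dict.nodup_keys_update _ _ hnd
  · intro s
    rw [pv_stepA_get? dic x s hnd, pv_F_stepB P x s hG, hget s]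
    simp only [hcont, decide_eq_true_eq, decide_eq_false_iff_not]
    by_cases h1 : 0 < pvF P (s - x)
    · have hne := pv_cands_ne_nil_of_F_pos P (s - x) h1
      rw [if_pos h1, if_neg hne, hgetD (s - x) h1]
      by_cases h2 : 0 < pvF P s
      · rw [if_pos h2, hgetD s h2,
            if_pos (show 0 < max (pvF P s) (pvF P (s - x) + 1) by omega)]
      · rw [if_neg h2, if_pos (show 0 < max (pvF P s) (pvF P (s - x) + 1) by omega)]
        have hFs : pvF P s = 0 := le_antisymm (by omega) (pv_F_nonneg P s)
        congr 1
        omega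
    · have hF0 : pvF P (s - x) = 0 := le_antisymm (by omega) (pv_F_nonneg P (s - x))
      rw [if_neg h1]
      by_cases hsx : s = x
      · have hc0 : ¬ pvCands P (s - x) = [] := by
          intro h
          have h0 := pv_zero_mem_cands_zero P hG
          rw [show (0:Int) = s - x by omega] at h0
          rw [h] at h0
          cases h0
        rw [if_neg hc0]
        by_cases h2 : 0 < pvF P s
        · rw [if_neg (by rw [← hsx]; tauto), if_pos h2,
              if_pos (show 0 < max (pvF P s) (pvF P (s - x) + 1) by omega)]
          congr 1
          omega
        · rw [if_pos ⟨hsx, by rw [← hsx]; exact h2⟩,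
              if_pos (show 0 < max (pvF P s) (pvF P (s - x) + 1) by omega)]
          have hFs : pvF P s = 0 := le_antisymm (by omega) (pv_F_nonneg P s)
          congr 1
          omega
      · have hc0 : pvCands P (s - x) = [] :=
          pv_cands_nil_of_F_eq_zero P (s - x) hG hF0 (by omega)
        rw [if_pos hc0, if_neg (fun h => hsx h.1)]

-- the combined fold invariant
theorem pv_fold_rel (nums : List Int) :
    pvGood (nums.foldl pvStepB [((0:Int), (0:Int))]) ∧
      pvRel (nums.foldl pvStepA PySem.Dict.empty) (nums.foldl pvStepB [((0:Int), (0:Int))]) := by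
  induction nums using List.reverseRecOn with
  | nil =>
    constructor
    · constructor
      · intro p hp
        simp only [List.foldl_nil, List.mem_singleton] at hp
        simp [hp]
      · simp
    · constructor
      · exact PySem.Dict.nodup_keys_empty
      · intro s
        have h0 : pvF [((0:Int),(0:Int))] s = 0 := by
          by_cases h : (0:Int) = s <;> simp [pvF, pvCands, h]
        simp [PySem.Dict.get?_empty, h0]
  | append_singleton ns x ih =>
    rw [List.foldl_append, List.foldl_append]
    simp only [List.foldl_cons, List.foldl_nil]
    exact ⟨pv_good_stepB _ x ih.1, pv_step_rel _ _ x ih.1 ih.2⟩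

-- B's pair list is exactly (sum, size) over all sublists
theorem pv_pairs_eq_sublists (nums : List Int) :
    nums.foldl pvStepB [((0:Int), (0:Int))] =
      nums.sublists.map (fun l => (l.sum, (l.length : Int))) := by
  induction nums using List.reverseRecOn with
  | nil => simp
  | append_singleton ns x ih =>
    rw [List.foldl_append, List.foldl_cons, List.foldl_nil, ih, List.sublists_concat]
    simp [pvStepB, List.map_map, Function.comp, add_comm]

-- the ∧-filterMap in B's port is filtering the positive candidates
theorem pv_filterMap_eq_filter (P : List (Int × Int)) (k : Int) :
    P.filterMap (fun p => if p.1 = k ∧ 0 < p.2 then some p.2 else none) =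
      (pvCands P k).filter (fun c => decide (0 < c)) := by
  induction P with
  | nil => rfl
  | cons p t ih =>
    by_cases h1 : p.1 = k
    · by_cases h2 : 0 < p.2
      · have e1 : (if p.1 = k ∧ 0 < p.2 then some p.2 else none) = some p.2 := if_pos ⟨h1, h2⟩
        have e2 : (if p.1 = k then some p.2 else (none : Option Int)) = some p.2 := if_pos h1
        simp [pvCands, List.filterMap_cons, e2, h2, ih]
      · have e1 : (if p.1 = k ∧ 0 < p.2 then some p.2 else none) = (none : Option Int) :=
          if_neg (fun h => h2 h.2)
        have e2 : (if p.1 = k then some p.2 else (none : Option Int)) = some p.2 := if_pos h1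
        simp [pvCands, e1, e2, h2, ih]
    · have e1 : (if p.1 = k ∧ 0 < p.2 then some p.2 else none) = (none : Option Int) :=
        if_neg (fun h => h1 h.1)
      have e2 : (if p.1 = k then some p.2 else (none : Option Int)) = none := if_neg h1
      simp [pvCands, e1, e2, ih]

-- ===== VERDICT (by name: the statement is the Claim_ definition above) =====
theorem maxLengthElement_spec : Claim_equal_maxLengthElement := by
  intro nums k hDom hPre
  unfold Spec_maxLengthElement
  obtain ⟨hG, hnd, hget⟩ := pv_fold_rel nums
  show ((nums.foldl pvStepA PySem.Dict.empty).get? k).getD 0 =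
    ((PySem.List.max? ((nums.foldl pvStepB [((0:Int), (0:Int))]).filterMap
        (fun p => if p.1 = k ∧ 0 < p.2 then some p.2 else none)) (fun c => c)).getD 0)
  set P := nums.foldl pvStepB [((0:Int), (0:Int))] with hP
  obtain ⟨l, hl, hlne, hlsum⟩ := hPre
  have hpair : (k, (l.length : Int)) ∈ P := by
    rw [hP, pv_pairs_eq_sublists]
    exact List.mem_map.mpr ⟨l, hl, by rw [hlsum]⟩
  have hcand : (l.length : Int) ∈ pvCands P k := (pv_mem_cands _ _ _).mpr hpair
  have hlpos : 0 < (l.length : Int) := by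
    have hne : l.length ≠ 0 := fun h => hlne (List.eq_nil_of_length_eq_zero h)
    have : 0 < l.length := Nat.pos_of_ne_zero hne
    exact_mod_cast this
  have hFpos : 0 < pvF P k := lt_of_lt_of_le hlpos (pv_le_F P k _ hcand)
  have hall : ∀ c ∈ pvCands P k, 0 ≤ c := fun c hc => (hG.1 _ ((pv_mem_cands _ _ _).mp hc)).1
  rw [hget k, if_pos hFpos, pv_filterMap_eq_filter]
  have hmemf : (l.length : Int) ∈ (pvCands P k).filter (fun c => decide (0 < c)) :=
    List.mem_filter.mpr ⟨hcand, by simpa using hlpos⟩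
  cases hflt : (pvCands P k).filter (fun c => decide (0 < c)) with
  | nil => rw [hflt] at hmemf; cases hmemf
  | cons c0 t0 =>
    have hc0pos : 0 < c0 := by
      have hc0 : c0 ∈ (pvCands P k).filter (fun c => decide (0 < c)) := by
        rw [hflt]; exact List.mem_cons_self
      simpa using (List.of_mem_filter hc0)
    rw [PySem.List.max?_id_cons]
    show pvF P k = t0.foldl max c0
    calc pvF P k = (pvCands P k).foldl max 0 := rfl
      _ = ((pvCands P k).filter (fun c => decide (0 < c))).foldl max 0 :=
            (pv_foldl_max_filter_pos _ 0 le_rfl hall).symm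
      _ = t0.foldl max (max 0 c0) := by rw [hflt]; rfl
      _ = t0.foldl max c0 := by rw [max_eq_right (le_of_lt hc0pos)]
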